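-- pv_equiv track=rewrite | github.com/jose-villegas/VCTRenderer | VCT_Engine/dependencies/oglplus/source/enums/make_enum.py | capitalize_name
-- ===== SOURCE A (Python) =====
-- def capitalize_name(name):
--
-- 	old_chars = list(name)
-- 	new_chars = list()
--
-- 	next_to_lower = True
--
-- 	for char in old_chars:
-- 		if char == '_':
-- 			next_to_lower = True
-- 		else:
-- 			if next_to_lower:
-- 				new_chars.append(char)
-- 			else:
-- 				new_chars.append(char.lower())
--
-- 			if char.isdigit():
-- 				next_to_lower = True
-- 			else:
-- 				next_to_lower = False
--
-- 	return str().join(new_chars)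
-- ===== SOURCE B (Python) =====
-- def capitalize_name(name):
--     parts = []
--     for tok in name.split('_'):
--         parts.append(tok[:1] + ''.join(c if p.isdigit() else c.lower()
--                                        for p, c in zip(tok, tok[1:])))
--     return ''.join(parts)
-- ===== Notes on version B (the rewrite author's own statement) =====
-- stated objective: idiomatic
-- what changed: Replaces A's single character loop with a mutable next_to_lower flag by split('_') into tokens, then per-token building via zip(tok, tok[1:]) keeping the first char and any char after a digit, joining the pieces.
import Mathlib
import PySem

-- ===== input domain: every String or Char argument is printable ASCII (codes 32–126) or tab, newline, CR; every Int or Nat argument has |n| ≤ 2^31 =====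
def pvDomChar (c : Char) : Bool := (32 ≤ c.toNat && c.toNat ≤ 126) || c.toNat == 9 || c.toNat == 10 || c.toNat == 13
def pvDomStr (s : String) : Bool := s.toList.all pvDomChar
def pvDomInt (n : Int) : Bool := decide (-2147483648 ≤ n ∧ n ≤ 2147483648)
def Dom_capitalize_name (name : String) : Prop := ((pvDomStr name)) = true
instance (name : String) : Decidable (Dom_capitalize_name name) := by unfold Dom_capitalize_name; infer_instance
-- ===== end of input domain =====

-- B replaces A's single stateful pass with a split('_')-then-per-token zip decomposition (objective: alternative/idiomatic).

-- ===== PORT A =====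
-- one foldl over the characters carrying (new_chars, next_to_lower), exactly A's loop
def capitalize_name (name : String) : String :=
  let old_chars := name.toList
  let r := old_chars.foldl
    (fun (st : List Char × Bool) char =>
      if char = '_' then (st.1, true)
      else
        ((st.1 ++ [if st.2 then char else PySem.Chars.lowerChar char]),
         if PySem.Chars.isdigit char then true else false))
    ([], true)
  String.ofList r.1

-- ===== PORT B =====
-- per-token body: tok[:1] + ''.join(c if p.isdigit() else c.lower() for p, c in zip(tok, tok[1:]))
def pvTok (tok : List Char) : List Char :=
  tok.take 1 ++ (tok.zip tok.tail).map
    (fun pc => if PySem.Chars.isdigit pc.1 then pc.2 else PySem.Chars.lowerChar pc.2)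

-- name.split('_') is List.splitOn '_' on the characters; ''.join the processed tokens
def capitalize_name_alt (name : String) : String :=
  String.ofList ((List.splitOn '_' name.toList).map pvTok).flatten

-- ===== PRECONDITION & SPEC =====
def Spec_capitalize_name (name : String) (out : String) : Prop := out = capitalize_name_alt name
instance (name : String) (out : String) : Decidable (Spec_capitalize_name name out) := by unfold Spec_capitalize_name; infer_instance

-- ===== CLAIM (what is proved, stated in full; the proofs are below) =====
def Claim_equal_capitalize_name : Prop := ∀ (name : String), Dom_capitalize_name name → Spec_capitalize_name name (capitalize_name name)

-- ===== LEMMAS AND PROOFS =====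

-- A's loop step, named (definitionally the lambda in capitalize_name)
def pvStepA (st : List Char × Bool) (char : Char) : List Char × Bool :=
  if char = '_' then (st.1, true)
  else
    ((st.1 ++ [if st.2 then char else PySem.Chars.lowerChar char]),
     if PySem.Chars.isdigit char then true else false)

-- A's loop as a pure structural recursion (no accumulator)
def pvLoopA : List Char → Bool → List Char
  | [], _ => []
  | c :: cs, b =>
    if c = '_' then pvLoopA cs true
    else (if b then c else PySem.Chars.lowerChar c) :: pvLoopA cs (PySem.Chars.isdigit c)

theorem pvFoldA_eq (cs : List Char) : ∀ (acc : List Char) (b : Bool),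
    (cs.foldl pvStepA (acc, b)).1 = acc ++ pvLoopA cs b := by
  induction cs with
  | nil => intro acc b; simp [pvLoopA]
  | cons c cs ih =>
    intro acc b
    simp only [List.foldl_cons, pvStepA, pvLoopA]
    by_cases h : c = '_'
    · rw [if_pos h, if_pos h]; exact ih acc true
    · rw [if_neg h, if_neg h, ih]
      cases PySem.Chars.isdigit c <;> simp

-- process a token whose FIRST character is governed by state b (the rest by prev-digit chaining)
def pvTokSt : List Char → Bool → List Char
  | [], _ => []
  | c :: rest, b =>
    (if b then c else PySem.Chars.lowerChar c) ::
      (rest.foldr (fun d (k : Char → List Char) p =>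
        (if PySem.Chars.isdigit p then d else PySem.Chars.lowerChar d) :: k d)
        (fun _ => []) c)

-- the prev/cur chain equals pvTokSt driven by the previous char's digit-ness
theorem pvChain_eq (rest : List Char) : ∀ (p : Char),
    (rest.foldr (fun d (k : Char → List Char) q =>
        (if PySem.Chars.isdigit q then d else PySem.Chars.lowerChar d) :: k d)
      (fun _ => []) p) = pvTokSt rest (PySem.Chars.isdigit p) := by
  induction rest with
  | nil => intro p; simp [pvTokSt]
  | cons d ds ih =>
    intro p
    simp only [List.foldr_cons, pvTokSt]

theorem pvZip_eq (u : List Char) : ∀ (q : Char),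
    ((q :: u).zip u).map
        (fun pc => if PySem.Chars.isdigit pc.1 then pc.2 else PySem.Chars.lowerChar pc.2)
      = pvTokSt u (PySem.Chars.isdigit q) := by
  induction u with
  | nil => intro q; simp [pvTokSt]
  | cons d ds ih =>
    intro q
    simp only [List.zip_cons_cons, List.map_cons, pvTokSt]
    rw [ih d, pvChain_eq]

theorem pvTok_eq (tok : List Char) : pvTok tok = pvTokSt tok true := by
  cases tok with
  | nil => rfl
  | cons c rest =>
    show c :: _ = _
    simp only [List.tail_cons, pvTokSt, if_pos]
    rw [pvZip_eq rest c, pvChain_eq]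
    simp

theorem pvSplitOn_ne_nil (cs : List Char) : List.splitOn '_' cs ≠ [] :=
  List.splitOnP_ne_nil _ cs

theorem pvSplitOn_cons (c : Char) (cs : List Char) :
    List.splitOn '_' (c :: cs) =
      if c = '_' then [] :: List.splitOn '_' cs
      else (List.splitOn '_' cs).modifyHead (List.cons c) := by
  simp [List.splitOn, List.splitOnP_cons]

-- main invariant: A's loop from state b equals B's join with the first token under state b
theorem pvMain (cs : List Char) : ∀ (b : Bool),
    pvLoopA cs b =
      match List.splitOn '_' cs with
      | [] => []
      | t :: ts => pvTokSt t b ++ (ts.map pvTok).flatten := by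
  induction cs with
  | nil =>
    intro b
    rw [show List.splitOn '_' ([] : List Char) = [[]] from rfl]
    rfl
  | cons c cs ih =>
    intro b
    rw [pvSplitOn_cons]
    cases hs : List.splitOn '_' cs with
    | nil => exact absurd hs (pvSplitOn_ne_nil cs)
    | cons t ts =>
      by_cases h : c = '_'
      · subst h
        rw [if_pos rfl]
        have hL : pvLoopA ('_' :: cs) b = pvLoopA cs true := by simp [pvLoopA]
        rw [hL, ih true, hs]
        show pvTokSt t true ++ (List.map pvTok ts).flatten
            = pvTokSt [] b ++ (List.map pvTok (t :: ts)).flatten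
        have h0 : pvTokSt ([] : List Char) b = [] := rfl
        rw [h0, List.map_cons, List.flatten_cons, List.nil_append, pvTok_eq]
      · rw [if_neg h]
        have hL : pvLoopA (c :: cs) b =
            (if b then c else PySem.Chars.lowerChar c) :: pvLoopA cs (PySem.Chars.isdigit c) := by
          simp [pvLoopA, h]
        rw [hL, ih (PySem.Chars.isdigit c), hs, List.modifyHead_cons]
        have ht : pvTokSt (c :: t) b =
            (if b then c else PySem.Chars.lowerChar c) :: pvTokSt t (PySem.Chars.isdigit c) := by
          show _ :: _ = _ :: _
          rw [pvChain_eq]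
        show (if b then c else PySem.Chars.lowerChar c) ::
              (pvTokSt t (PySem.Chars.isdigit c) ++ (List.map pvTok ts).flatten)
            = pvTokSt (c :: t) b ++ (List.map pvTok ts).flatten
        rw [ht]
        simp

-- ===== VERDICT (by name: the statement is the Claim_ definition above) =====
theorem capitalize_name_spec : Claim_equal_capitalize_name := by
  intro name _
  show capitalize_name name = capitalize_name_alt name
  show String.ofList (name.toList.foldl pvStepA ([], true)).1
      = String.ofList ((List.splitOn '_' name.toList).map pvTok).flatten
  rw [pvFoldA_eq name.toList [] true, List.nil_append, pvMain name.toList true]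
  cases hs : List.splitOn '_' name.toList with
  | nil => exact absurd hs (pvSplitOn_ne_nil _)
  | cons t ts => rw [List.map_cons, List.flatten_cons, pvTok_eq]
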